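-- pv_equiv track=rewrite | github.com/edanielistvan/references | Python/TestPowers/power.py | alsoSixAndFourPower
-- ===== SOURCE A (Python) =====
-- def alsoSixAndFourPower(n: int, k: int, s=0) -> int:
--     if k == 0:
--         return 1
--     elif k == 1:
--         return 1
--     else:
--         if k % 6 == 0:
--             return 1 + alsoSixAndFourPower((n * n) ** 3, k // 6, s)
--         if k % 4 == 0:
--             return 1 + alsoSixAndFourPower(n * n * n * n, k // 4, s)
--         elif k % 3 == 0:
--             return 1 + alsoSixAndFourPower(n * n * n, k // 3, s)
--         elif k % 2 == 0:
--             return 1 + alsoSixAndFourPower(n * n, k // 2, s)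
--         elif k % 3 == 1 or k % 2 == 1:
--             return 1 + alsoSixAndFourPower(n, k - 1, s + n)
--         else:
--             return 1 + alsoSixAndFourPower(n, k - 2, s + n + n)
-- ===== SOURCE B (Python) =====
-- def alsoSixAndFourPower(n: int, k: int, s=0) -> int:
--     # Iterative step counter: the return value only depends on k, so the
--     # dead n/s arithmetic is dropped and the branch cascade runs in a loop.
--     count = 1
--     while k != 0 and k != 1:
--         if k % 6 == 0:
--             k //= 6
--         elif k % 4 == 0:
--             k //= 4
--         elif k % 3 == 0:
--             k //= 3
--         elif k % 2 == 0:
--             k //= 2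
--         else:
--             k -= 1
--         count += 1
--     return count
-- ===== Notes on version B (the rewrite author's own statement) =====
-- stated objective: faster
-- what changed: Recursion carrying huge dead arithmetic ((n*n)**3 etc. and the s accumulator) is replaced by an iterative while-loop over k alone with a step counter, since the return value depends only on k.
import Mathlib
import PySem

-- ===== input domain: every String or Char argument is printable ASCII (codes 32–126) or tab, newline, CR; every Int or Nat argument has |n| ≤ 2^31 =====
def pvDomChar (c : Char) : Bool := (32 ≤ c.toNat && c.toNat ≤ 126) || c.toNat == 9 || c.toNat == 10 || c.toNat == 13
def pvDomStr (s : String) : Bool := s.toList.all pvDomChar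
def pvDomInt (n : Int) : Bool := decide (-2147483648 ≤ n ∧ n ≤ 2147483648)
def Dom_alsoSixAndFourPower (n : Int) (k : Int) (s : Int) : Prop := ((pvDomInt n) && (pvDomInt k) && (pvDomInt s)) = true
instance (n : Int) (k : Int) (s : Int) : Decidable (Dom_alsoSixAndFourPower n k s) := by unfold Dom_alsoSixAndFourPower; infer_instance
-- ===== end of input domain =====

-- B replaces A's recursion (which carries huge dead n/s arithmetic) by an iterative
-- step-count loop over k alone; B is measurably faster (A's powers blow up in bit-size).


-- ===== PORT A =====
-- Literal transliteration of A's recursion; 'fuel' only makes it total (Python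
-- diverges exactly where the fuel could run out, i.e. k < 0, excluded by Pre_).
def alsoSixAndFourPowerFuel (fuel : Nat) (n : Int) (k : Int) (s : Int) : Int :=
  match fuel with
  | 0 => 0
  | fuel + 1 =>
    if k = 0 then 1
    else if k = 1 then 1
    else if PySem.Int.mod k 6 = 0 then
      1 + alsoSixAndFourPowerFuel fuel ((n * n) ^ 3) (PySem.Int.floordiv k 6) s
    else if PySem.Int.mod k 4 = 0 then
      1 + alsoSixAndFourPowerFuel fuel (n * n * n * n) (PySem.Int.floordiv k 4) s
    else if PySem.Int.mod k 3 = 0 then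
      1 + alsoSixAndFourPowerFuel fuel (n * n * n) (PySem.Int.floordiv k 3) s
    else if PySem.Int.mod k 2 = 0 then
      1 + alsoSixAndFourPowerFuel fuel (n * n) (PySem.Int.floordiv k 2) s
    else if PySem.Int.mod k 3 = 1 ∨ PySem.Int.mod k 2 = 1 then
      1 + alsoSixAndFourPowerFuel fuel n (k - 1) (s + n)
    else
      1 + alsoSixAndFourPowerFuel fuel n (k - 2) (s + n + n)

def alsoSixAndFourPower (n : Int) (k : Int) (s : Int) : Int :=
  alsoSixAndFourPowerFuel (k.toNat + 1) n k s

-- ===== PORT B =====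
-- Transliteration of B's while-loop: only k and the counter are state.
def alsoSixAndFourPowerLoop (fuel : Nat) (k : Int) (count : Int) : Int :=
  match fuel with
  | 0 => count
  | fuel + 1 =>
    if k = 0 ∨ k = 1 then count
    else
      let k' :=
        if PySem.Int.mod k 6 = 0 then PySem.Int.floordiv k 6
        else if PySem.Int.mod k 4 = 0 then PySem.Int.floordiv k 4
        else if PySem.Int.mod k 3 = 0 then PySem.Int.floordiv k 3
        else if PySem.Int.mod k 2 = 0 then PySem.Int.floordiv k 2
        else k - 1
      alsoSixAndFourPowerLoop fuel k' (count + 1)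

def alsoSixAndFourPower_alt (n : Int) (k : Int) (s : Int) : Int :=
  alsoSixAndFourPowerLoop (k.toNat + 1) k 1

-- ===== PRECONDITION & SPEC =====
-- Pre_ excludes k < 0, on which the Python A never returns (infinite recursion → RecursionError).
def Pre_alsoSixAndFourPower (n : Int) (k : Int) (s : Int) : Prop := 0 ≤ k
instance (n : Int) (k : Int) (s : Int) : Decidable (Pre_alsoSixAndFourPower n k s) := by
  unfold Pre_alsoSixAndFourPower; infer_instance
def pvWitness_alsoSixAndFourPower : Int × Int × Int := (2, 10, 0)

def Spec_alsoSixAndFourPower (n : Int) (k : Int) (s : Int) (out : Int) : Prop := out = alsoSixAndFourPower_alt n k s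
instance (n : Int) (k : Int) (s : Int) (out : Int) : Decidable (Spec_alsoSixAndFourPower n k s out) := by unfold Spec_alsoSixAndFourPower; infer_instance

-- ===== CLAIM (what is proved, stated in full; the proofs are below) =====
def Claim_equal_alsoSixAndFourPower : Prop := ∀ (n : Int) (k : Int) (s : Int), Dom_alsoSixAndFourPower n k s → Pre_alsoSixAndFourPower n k s → Spec_alsoSixAndFourPower n k s (alsoSixAndFourPower n k s)

-- ===== LEMMAS AND PROOFS =====

-- Python mod/floordiv as emod/ediv for the positive literal divisors used here.
theorem pv_mod_eq (a b : Int) (hb : 0 < b) : PySem.Int.mod a b = a % b :=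
  PySem.Int.mod_eq_emod_of_pos hb

theorem pv_fdiv_eq (a b : Int) (hb : 0 < b) : PySem.Int.floordiv a b = a / b :=
  PySem.Int.floordiv_eq_ediv_of_pos hb

-- Main invariant: with enough fuel on both sides, the loop started at `count`
-- returns `count - 1 +` A's recursion value.
theorem pv_main (m : Nat) : ∀ (f1 f2 : Nat) (n k s c : Int), 0 ≤ k → k.toNat ≤ m →
    k.toNat < f1 → k.toNat < f2 →
    alsoSixAndFourPowerLoop f2 k c = c - 1 + alsoSixAndFourPowerFuel f1 n k s := by
  induction m with
  | zero =>
    intro f1 f2 n k s c hk hm h1 h2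
    have hk0 : k = 0 := by omega
    subst hk0
    match f1, h1 with
    | f1 + 1, _ =>
    match f2, h2 with
    | f2 + 1, _ =>
    simp [alsoSixAndFourPowerLoop, alsoSixAndFourPowerFuel]
  | succ m ih =>
    intro f1 f2 n k s c hk hm h1 h2
    match f1, h1 with
    | f1 + 1, h1 =>
    match f2, h2 with
    | f2 + 1, h2 =>
    by_cases hk0 : k = 0
    · subst hk0; simp [alsoSixAndFourPowerLoop, alsoSixAndFourPowerFuel]
    by_cases hk1 : k = 1
    · subst hk1; simp [alsoSixAndFourPowerLoop, alsoSixAndFourPowerFuel]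
    have hk2 : 2 ≤ k := by omega
    rw [alsoSixAndFourPowerLoop, alsoSixAndFourPowerFuel]
    simp only [if_neg (show ¬(k = 0 ∨ k = 1) by omega), if_neg hk0, if_neg hk1,
      pv_mod_eq _ 6 (by norm_num), pv_mod_eq _ 4 (by norm_num),
      pv_mod_eq _ 3 (by norm_num), pv_mod_eq _ 2 (by norm_num),
      pv_fdiv_eq _ 6 (by norm_num), pv_fdiv_eq _ 4 (by norm_num),
      pv_fdiv_eq _ 3 (by norm_num), pv_fdiv_eq _ 2 (by norm_num)]
    by_cases h6 : k % 6 = 0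
    · simp only [if_pos h6]
      rw [ih f1 f2 ((n * n) ^ 3) _ s _ (by omega) (by omega) (by omega) (by omega)]
      ring
    by_cases h4 : k % 4 = 0
    · simp only [if_neg h6, if_pos h4]
      rw [ih f1 f2 (n * n * n * n) _ s _ (by omega) (by omega) (by omega) (by omega)]
      ring
    by_cases h3 : k % 3 = 0
    · simp only [if_neg h6, if_neg h4, if_pos h3]
      rw [ih f1 f2 (n * n * n) _ s _ (by omega) (by omega) (by omega) (by omega)]
      ring
    by_cases h2' : k % 2 = 0
    · simp only [if_neg h6, if_neg h4, if_neg h3, if_pos h2']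
      rw [ih f1 f2 (n * n) _ s _ (by omega) (by omega) (by omega) (by omega)]
      ring
    · -- odd k: A takes its 'k % 3 == 1 or k % 2 == 1' branch (k % 2 = 1 always holds here)
      have hodd : k % 2 = 1 := by omega
      simp only [if_neg h6, if_neg h4, if_neg h3, if_neg h2', if_pos (Or.inr hodd)]
      rw [ih f1 f2 n (k - 1) (s + n) _ (by omega) (by omega) (by omega) (by omega)]
      ring

-- ===== VERDICT (by name: the statement is the Claim_ definition above) =====
theorem alsoSixAndFourPower_spec : Claim_equal_alsoSixAndFourPower := by
  intro n k s _hdom hk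
  unfold Spec_alsoSixAndFourPower alsoSixAndFourPower alsoSixAndFourPower_alt
  rw [pv_main k.toNat (k.toNat + 1) (k.toNat + 1) n k s 1 hk (le_refl _) (by omega) (by omega)]
  ring
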